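-- pv_equiv track=rewrite | github.com/daedalus/libciphers | src/libciphers/__init__.py | prime_position_decrypt
-- ===== SOURCE A (Python) =====
-- def prime_position_decrypt(cipher: str) -> str:
--     """Shift by prime numbers based on position"""
--     primes = []
--     num = 2
--     while len(primes) < 50:
--         is_prime = True
--         for p in primes:
--             if num % p == 0:
--                 is_prime = False
--                 break
--         if is_prime:
--             primes.append(num)
--         num += 1
--
--     result = ""
--     for i, c in enumerate(cipher):
--         if c.isalpha():
--             shift = primes[i] % 26 if i < len(primes) else i % 26
--             result += chr((ord(c) - ord("A") - shift) % 26 + ord("A"))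
--         else:
--             result += c
--     return result
-- ===== SOURCE B (Python) =====
-- def _first_50_primes():
--     # Sieve of Eratosthenes up to 230 (the 50th prime is 229).
--     limit = 230
--     sieve = [True] * limit
--     sieve[0] = False
--     sieve[1] = False
--     for n in range(2, limit):
--         if sieve[n]:
--             for m in range(n * n, limit, n):
--                 sieve[m] = False
--     return [n for n in range(limit) if sieve[n]][:50]
--
--
-- def prime_position_decrypt(cipher: str) -> str:
--     """Shift by prime numbers based on position"""
--     primes = _first_50_primes()
--
--     def dec(i, c):
--         if not c.isalpha():
--             return c
--         shift = (primes[i] if i < 50 else i) % 26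
--         return chr((ord(c) - ord("A") - shift) % 26 + ord("A"))
--
--     return "".join(dec(i, c) for i, c in enumerate(cipher))
-- ===== Notes on version B (the rewrite author's own statement) =====
-- stated objective: idiomatic
-- what changed: B generates the 50-prime table with a Sieve of Eratosthenes (boolean array up to 230) instead of A's trial division against previously found primes, and assembles the output with a str.join over a generator instead of repeated string concatenation.
import Mathlib
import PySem

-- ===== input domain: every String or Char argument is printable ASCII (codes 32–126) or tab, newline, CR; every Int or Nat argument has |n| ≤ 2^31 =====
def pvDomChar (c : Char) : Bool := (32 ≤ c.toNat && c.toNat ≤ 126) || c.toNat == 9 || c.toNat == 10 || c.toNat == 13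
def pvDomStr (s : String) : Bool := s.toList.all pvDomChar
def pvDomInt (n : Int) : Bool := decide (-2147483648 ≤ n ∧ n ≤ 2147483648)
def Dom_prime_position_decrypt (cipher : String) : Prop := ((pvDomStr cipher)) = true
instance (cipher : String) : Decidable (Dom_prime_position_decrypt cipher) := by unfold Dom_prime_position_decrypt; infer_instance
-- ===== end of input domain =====

-- B replaces A's trial-division prime generation with a Sieve of Eratosthenes and builds the
-- output by a single map/join instead of repeated string concatenation (objective: idiomatic).

-- ===== PORT A =====
-- inner 'for p in primes: if num % p == 0: break' loop (short-circuit, like Python's break)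
def pvA_isPrime (primes : List Int) (num : Int) : Bool :=
  primes.all (fun p => !(PySem.Int.mod num p == 0))

-- 'while len(primes) < 50' loop; the fuel only totalizes the recursion (the loop body runs
-- exactly for num = 2..229, 228 iterations, so fuel 300 never alters the computed value)
def pvA_primesLoop : Nat → List Int → Int → List Int
  | 0, primes, _ => primes
  | fuel + 1, primes, num =>
    if primes.length < 50 then
      pvA_primesLoop fuel (if pvA_isPrime primes num then primes ++ [num] else primes) (num + 1)
    else primes

def prime_position_decrypt (cipher : String) : String :=
  let primes := pvA_primesLoop 300 [] 2
  let result := (PySem.List.enumerate cipher.toList 0).foldl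
    (fun acc ic =>
      if PySem.Chars.isalpha ic.2 then
        let shift := if ic.1 < (primes.length : Int) then
            PySem.Int.mod (PySem.List.pyGetD primes ic.1 0) 26
          else PySem.Int.mod ic.1 26
        acc ++ [Char.ofNat ((PySem.Int.mod ((ic.2.toNat : Int) - 65 - shift) 26 + 65).toNat)]
      else acc ++ [ic.2]) []
  String.ofList result

-- ===== PORT B =====
-- sieve[i] is indexed with i.toNat: every index written/read comes from a nonnegative range
def pvB_sieve : List Bool :=
  let sieve := ((List.replicate 230 true).set 0 false).set 1 false
  (PySem.List.pyRange 2 230 1).foldl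
    (fun sieve n =>
      if sieve.getD n.toNat false then
        (PySem.List.pyRange (n * n) 230 n).foldl (fun s m => s.set m.toNat false) sieve
      else sieve) sieve

def pvB_primes : List Int :=
  ((PySem.List.pyRange 0 230 1).filter (fun n => pvB_sieve.getD n.toNat false)).take 50

def pvB_dec (primes : List Int) (i : Int) (c : Char) : Char :=
  if !PySem.Chars.isalpha c then c
  else
    let shift := PySem.Int.mod (if i < 50 then PySem.List.pyGetD primes i 0 else i) 26
    Char.ofNat ((PySem.Int.mod ((c.toNat : Int) - 65 - shift) 26 + 65).toNat)

def prime_position_decrypt_alt (cipher : String) : String :=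
  let primes := pvB_primes
  String.ofList ((PySem.List.enumerate cipher.toList 0).map (fun ic => pvB_dec primes ic.1 ic.2))

-- ===== PRECONDITION & SPEC =====
def Spec_prime_position_decrypt (cipher : String) (out : String) : Prop := out = prime_position_decrypt_alt cipher
instance (cipher : String) (out : String) : Decidable (Spec_prime_position_decrypt cipher out) := by unfold Spec_prime_position_decrypt; infer_instance

-- ===== CLAIM (what is proved, stated in full; the proofs are below) =====
def Claim_equal_prime_position_decrypt : Prop := ∀ (cipher : String), Dom_prime_position_decrypt cipher → Spec_prime_position_decrypt cipher (prime_position_decrypt cipher)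

-- ===== LEMMAS AND PROOFS =====

-- both prime-generation strategies yield the same closed list
set_option maxRecDepth 40000 in
theorem pv_primes_eq : pvA_primesLoop 300 [] 2 = pvB_primes := by decide

set_option maxRecDepth 40000 in
theorem pv_primes_len : ((pvB_primes).length : Int) = 50 := by decide

-- A's loop body, with B's primes substituted, appends exactly pvB_dec of the pair
theorem pv_body_eq (acc : List Char) (ic : Int × Char) :
    (if PySem.Chars.isalpha ic.2 then
      let shift := if ic.1 < ((pvB_primes).length : Int) then
          PySem.Int.mod (PySem.List.pyGetD pvB_primes ic.1 0) 26
        else PySem.Int.mod ic.1 26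
      acc ++ [Char.ofNat ((PySem.Int.mod ((ic.2.toNat : Int) - 65 - shift) 26 + 65).toNat)]
    else acc ++ [ic.2]) = acc ++ [pvB_dec pvB_primes ic.1 ic.2] := by
  simp only [pv_primes_len, pvB_dec]
  by_cases h : PySem.Chars.isalpha ic.2
  · simp only [h, if_true, Bool.not_true, Bool.false_eq_true, if_false]
    by_cases hi : ic.1 < (50 : Int) <;> simp [hi]
  · simp [h]

-- ===== VERDICT (by name: the statement is the Claim_ definition above) =====
theorem prime_position_decrypt_spec : Claim_equal_prime_position_decrypt := by
  intro cipher _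
  unfold Spec_prime_position_decrypt prime_position_decrypt prime_position_decrypt_alt
  rw [pv_primes_eq]
  refine congrArg String.ofList ?_
  have h1 := congrArg (fun f => List.foldl f ([] : List Char) (PySem.List.enumerate cipher.toList 0))
    (funext fun acc => funext fun ic => pv_body_eq acc ic)
  exact h1.trans (PySem.List.foldl_append_singleton_eq_map _ _ [])
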